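-- pv_equiv track=rewrite | github.com/k7tzu/python-workspace | BNS/subject-6/exercise-2.py | depouille
-- ===== SOURCE A (Python) =====
-- def depouille(urne):
--     """
--     >>> depouille(['A', 'B', 'A'])
--     {'A': 2, 'B': 1}
--     >>> depouille([])
--     {}
--     >>> depouille(['A', 'A', 'A', 'B', 'C', 'B', 'C', 'B', 'C', 'B'])
--     {'A': 3, 'B': 4, 'C': 3}
--     """
--     resultat = {}
--     for bulletin in urne:
--         if bulletin in resultat:
--             resultat[bulletin] += 1
--         else:
--             resultat[bulletin] = 1
--     return resultat
-- ===== SOURCE B (Python) =====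
-- def depouille(urne):
--     return {b: urne.count(b) for b in dict.fromkeys(urne)}
-- ===== Notes on version B (the rewrite author's own statement) =====
-- stated objective: idiomatic
-- what changed: Replaces A's single accumulating pass that maintains a running tally dict with a two-phase strategy: collect the distinct ballots in first-occurrence order (dict.fromkeys), then count each one with a full urne.count scan.
import Mathlib
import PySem

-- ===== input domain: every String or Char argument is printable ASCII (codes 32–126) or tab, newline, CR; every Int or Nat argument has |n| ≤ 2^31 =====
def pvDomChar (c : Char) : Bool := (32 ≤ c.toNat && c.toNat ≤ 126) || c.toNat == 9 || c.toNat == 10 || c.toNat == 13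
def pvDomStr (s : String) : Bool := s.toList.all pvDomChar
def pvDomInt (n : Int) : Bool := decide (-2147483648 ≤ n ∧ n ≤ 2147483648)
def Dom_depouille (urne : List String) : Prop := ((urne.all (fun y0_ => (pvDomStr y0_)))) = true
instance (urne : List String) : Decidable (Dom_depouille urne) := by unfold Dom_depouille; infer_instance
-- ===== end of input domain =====

-- B replaces A's single accumulating tally pass by collecting distinct ballots first and counting each with a full scan (idiomatic dict comprehension).


-- ===== PORT A =====
-- for bulletin in urne: if bulletin in resultat: resultat[bulletin] += 1 else: resultat[bulletin] = 1
def depouille (urne : List String) : List (String × Int) :=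
  (urne.foldl
    (fun resultat bulletin =>
      if resultat.contains bulletin then
        resultat.insert bulletin (resultat.getD bulletin 0 + 1)
      else
        resultat.insert bulletin 1)
    PySem.Dict.empty).items

-- ===== PORT B =====
-- {b: urne.count(b) for b in dict.fromkeys(urne)}
def depouille_alt (urne : List String) : List (String × Int) :=
  (PySem.List.dedup urne).map (fun b => (b, (urne.count b : Int)))

-- ===== PRECONDITION & SPEC =====
def Spec_depouille (urne : List String) (out : List (String × Int)) : Prop := out = depouille_alt urne
instance (urne : List String) (out : List (String × Int)) : Decidable (Spec_depouille urne out) := by unfold Spec_depouille; infer_instance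

-- ===== CLAIM (what is proved, stated in full; the proofs are below) =====
def Claim_equal_depouille : Prop := ∀ (urne : List String), Dom_depouille urne → Spec_depouille urne (depouille urne)

-- ===== LEMMAS AND PROOFS =====

-- A's branching step function is the unconditional 'insert b (getD b 0 + 1)' step:
-- when the key is absent, getD returns 0, so 'insert b 1' coincides with it.
theorem depouille_step_eq :
    (fun (resultat : PySem.Dict String Int) (bulletin : String) =>
      if resultat.contains bulletin then
        resultat.insert bulletin (resultat.getD bulletin 0 + 1)
      else
        resultat.insert bulletin 1)
    = (fun resultat bulletin => resultat.insert bulletin (resultat.getD bulletin 0 + 1)) := by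
  funext d b
  by_cases h : d.contains b
  · simp [h]
  · simp [h, PySem.Dict.getD_of_not_contains d 0 (by simpa using h)]

-- ===== VERDICT (by name: the statement is the Claim_ definition above) =====
theorem depouille_spec : Claim_equal_depouille := by
  intro urne _
  show _ = _
  rw [depouille, depouille_step_eq, PySem.Dict.foldl_insert_getD_add_one_eq_counter,
      PySem.Dict.items_counter, depouille_alt]
  simp
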